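-- pv_equiv track=rewrite | github.com/wonjongin/babohun | src/EDA/연관분석/2번.py | map_seoul_disease_to_department
-- ===== SOURCE A (Python) =====
-- def map_seoul_disease_to_department(disease_name):
--     name = disease_name.strip().lower()
--
--     if any(x in name for x in ["hypertension", "hypertensive", "right heart failure", "angina", "atherosclerotic"]):
--         return "순환기내과"
--     elif any(x in name for x in ["diabetes", "non-insulin", "non0insulin"]):
--         return "내분비내과"
--     elif any(x in name for x in ["lung cancer", "bronchopneumonia", "pneumonia", "covid"]):
--         return "호흡기내과"
--     elif any(x in name for x in ["hepatocellular", "cholangiocarcinoma", "gallstone", "cardia of stomach"]):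
--         return "소화기내과"
--     elif any(x in name for x in ["chronic kidney", "tubular necrosis"]):
--         return "신장내과"
--     elif any(x in name for x in ["cataract", "glaucoma", "retinopathy"]):
--         return "안과"
--     elif any(x in name for x in ["disc", "stenosis", "myelopathy", "spinal"]):
--         return "신경외과"
--     elif any(x in name for x in ["cerebral infarction", "concussion", "hemiplegia", "paraplegia", "occlusion", "dissection", "dizziness"]):
--         return "신경과"
--     elif any(x in name for x in ["caries", "pulpitis", "teeth", "tooth"]):
--         return "치과"
--     elif any(x in name for x in ["prostate", "bph", "benign prostate"]):
--         return "비뇨의학과"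
--     elif any(x in name for x in ["arthritis", "periarthritis", "femur neck fracture", "thr", "osteoarthritis"]):
--         return "정형외과"
--     elif any(x in name for x in ["paranoid schizophrenia"]):
--         return "정신건강의학과"
--     elif any(x in name for x in ["dermatitis"]):
--         return "피부과"
--     elif any(x in name for x in ["hernia"]):
--         return "외과"
--     elif any(x in name for x in ["emergency use of u07", "work accident", "acute pain"]):
--         return "응급의학과"
--     elif any(x in name for x in ["therapeutic radiology", "radiation"]):
--         return "방사선종양학과"
--     else:
--         return "기타 또는 미지정"
-- ===== SOURCE B (Python) =====
-- # Flat priority-scored keyword list: collect every matching keyword's score, return the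
-- # department with the minimum score (instead of A's ordered first-match elif chain).
-- DEPTS = ["순환기내과", "내분비내과", "호흡기내과", "소화기내과", "신장내과", "안과",
--          "신경외과", "신경과", "치과", "비뇨의학과", "정형외과", "정신건강의학과",
--          "피부과", "외과", "응급의학과", "방사선종양학과"]
--
-- KEYS = [(0, "hypertension"), (0, "hypertensive"), (0, "right heart failure"), (0, "angina"), (0, "atherosclerotic"),
--         (1, "diabetes"), (1, "non-insulin"), (1, "non0insulin"),
--         (2, "lung cancer"), (2, "bronchopneumonia"), (2, "pneumonia"), (2, "covid"),
--         (3, "hepatocellular"), (3, "cholangiocarcinoma"), (3, "gallstone"), (3, "cardia of stomach"),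
--         (4, "chronic kidney"), (4, "tubular necrosis"),
--         (5, "cataract"), (5, "glaucoma"), (5, "retinopathy"),
--         (6, "disc"), (6, "stenosis"), (6, "myelopathy"), (6, "spinal"),
--         (7, "cerebral infarction"), (7, "concussion"), (7, "hemiplegia"), (7, "paraplegia"), (7, "occlusion"), (7, "dissection"), (7, "dizziness"),
--         (8, "caries"), (8, "pulpitis"), (8, "teeth"), (8, "tooth"),
--         (9, "prostate"), (9, "bph"), (9, "benign prostate"),
--         (10, "arthritis"), (10, "periarthritis"), (10, "femur neck fracture"), (10, "thr"), (10, "osteoarthritis"),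
--         (11, "paranoid schizophrenia"),
--         (12, "dermatitis"),
--         (13, "hernia"),
--         (14, "emergency use of u07"), (14, "work accident"), (14, "acute pain"),
--         (15, "therapeutic radiology"), (15, "radiation")]
--
-- def map_seoul_disease_to_department(disease_name):
--     name = disease_name.strip().lower()
--     hits = [p for p, kw in KEYS if kw in name]
--     if not hits:
--         return "기타 또는 미지정"
--     return DEPTS[min(hits)]
-- ===== Notes on version B (the rewrite author's own statement) =====
-- stated objective: alternative
-- what changed: Replaces the ordered 16-branch elif chain (first match wins, early exit) by a flat priority-scored keyword list: B collects the scores of ALL matching keywords in one comprehension and indexes the department table with the minimum score.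
import Mathlib
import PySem

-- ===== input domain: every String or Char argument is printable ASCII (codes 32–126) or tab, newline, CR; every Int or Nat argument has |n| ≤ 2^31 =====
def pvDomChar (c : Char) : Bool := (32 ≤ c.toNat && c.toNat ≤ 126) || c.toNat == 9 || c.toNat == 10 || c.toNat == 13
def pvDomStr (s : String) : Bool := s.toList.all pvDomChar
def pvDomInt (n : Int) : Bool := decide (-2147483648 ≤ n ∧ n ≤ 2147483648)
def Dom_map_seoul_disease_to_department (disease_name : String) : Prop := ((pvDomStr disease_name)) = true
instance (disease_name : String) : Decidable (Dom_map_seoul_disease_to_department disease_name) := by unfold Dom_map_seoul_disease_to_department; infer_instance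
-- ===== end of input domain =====

-- B replaces A's ordered elif chain by a flat priority-scored keyword list: it collects every matching keyword's score and returns the department of the minimum score; objective: alternative.


-- ===== PORT A =====
def map_seoul_disease_to_department (disease_name : String) : String :=
  let name := PySem.Str.lower (PySem.Str.strip disease_name)
  if (["hypertension", "hypertensive", "right heart failure", "angina", "atherosclerotic"] : List String).any (fun x => PySem.Str.isIn x name) then "순환기내과"
  else if (["diabetes", "non-insulin", "non0insulin"] : List String).any (fun x => PySem.Str.isIn x name) then "내분비내과"
  else if (["lung cancer", "bronchopneumonia", "pneumonia", "covid"] : List String).any (fun x => PySem.Str.isIn x name) then "호흡기내과"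
  else if (["hepatocellular", "cholangiocarcinoma", "gallstone", "cardia of stomach"] : List String).any (fun x => PySem.Str.isIn x name) then "소화기내과"
  else if (["chronic kidney", "tubular necrosis"] : List String).any (fun x => PySem.Str.isIn x name) then "신장내과"
  else if (["cataract", "glaucoma", "retinopathy"] : List String).any (fun x => PySem.Str.isIn x name) then "안과"
  else if (["disc", "stenosis", "myelopathy", "spinal"] : List String).any (fun x => PySem.Str.isIn x name) then "신경외과"
  else if (["cerebral infarction", "concussion", "hemiplegia", "paraplegia", "occlusion", "dissection", "dizziness"] : List String).any (fun x => PySem.Str.isIn x name) then "신경과"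
  else if (["caries", "pulpitis", "teeth", "tooth"] : List String).any (fun x => PySem.Str.isIn x name) then "치과"
  else if (["prostate", "bph", "benign prostate"] : List String).any (fun x => PySem.Str.isIn x name) then "비뇨의학과"
  else if (["arthritis", "periarthritis", "femur neck fracture", "thr", "osteoarthritis"] : List String).any (fun x => PySem.Str.isIn x name) then "정형외과"
  else if (["paranoid schizophrenia"] : List String).any (fun x => PySem.Str.isIn x name) then "정신건강의학과"
  else if (["dermatitis"] : List String).any (fun x => PySem.Str.isIn x name) then "피부과"
  else if (["hernia"] : List String).any (fun x => PySem.Str.isIn x name) then "외과"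
  else if (["emergency use of u07", "work accident", "acute pain"] : List String).any (fun x => PySem.Str.isIn x name) then "응급의학과"
  else if (["therapeutic radiology", "radiation"] : List String).any (fun x => PySem.Str.isIn x name) then "방사선종양학과"
  else "기타 또는 미지정"

-- ===== PORT B =====
-- the flat (priority score, keyword) list and the score-indexed department table from Source B
def pvKeys : List (Nat × String) :=
  [(0, "hypertension"), (0, "hypertensive"), (0, "right heart failure"), (0, "angina"), (0, "atherosclerotic"),
   (1, "diabetes"), (1, "non-insulin"), (1, "non0insulin"),
   (2, "lung cancer"), (2, "bronchopneumonia"), (2, "pneumonia"), (2, "covid"),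
   (3, "hepatocellular"), (3, "cholangiocarcinoma"), (3, "gallstone"), (3, "cardia of stomach"),
   (4, "chronic kidney"), (4, "tubular necrosis"),
   (5, "cataract"), (5, "glaucoma"), (5, "retinopathy"),
   (6, "disc"), (6, "stenosis"), (6, "myelopathy"), (6, "spinal"),
   (7, "cerebral infarction"), (7, "concussion"), (7, "hemiplegia"), (7, "paraplegia"), (7, "occlusion"), (7, "dissection"), (7, "dizziness"),
   (8, "caries"), (8, "pulpitis"), (8, "teeth"), (8, "tooth"),
   (9, "prostate"), (9, "bph"), (9, "benign prostate"),
   (10, "arthritis"), (10, "periarthritis"), (10, "femur neck fracture"), (10, "thr"), (10, "osteoarthritis"),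
   (11, "paranoid schizophrenia"),
   (12, "dermatitis"),
   (13, "hernia"),
   (14, "emergency use of u07"), (14, "work accident"), (14, "acute pain"),
   (15, "therapeutic radiology"), (15, "radiation")]

def pvDepts : List String :=
  ["순환기내과", "내분비내과", "호흡기내과", "소화기내과", "신장내과", "안과",
   "신경외과", "신경과", "치과", "비뇨의학과", "정형외과", "정신건강의학과",
   "피부과", "외과", "응급의학과", "방사선종양학과"]

def map_seoul_disease_to_department_alt (disease_name : String) : String :=
  let name := PySem.Str.lower (PySem.Str.strip disease_name)
  let hits := (pvKeys.filter (fun p => PySem.Str.isIn p.2 name)).map Prod.fst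
  match hits.min? with
  | none => "기타 또는 미지정"
  | some m => pvDepts.getD m "기타 또는 미지정"

-- ===== PRECONDITION & SPEC =====
def Spec_map_seoul_disease_to_department (disease_name : String) (out : String) : Prop := out = map_seoul_disease_to_department_alt disease_name
instance (disease_name : String) (out : String) : Decidable (Spec_map_seoul_disease_to_department disease_name out) := by unfold Spec_map_seoul_disease_to_department; infer_instance

-- ===== CLAIM (what is proved, stated in full; the proofs are below) =====
def Claim_equal_map_seoul_disease_to_department : Prop := ∀ (disease_name : String), Dom_map_seoul_disease_to_department disease_name → Spec_map_seoul_disease_to_department disease_name (map_seoul_disease_to_department disease_name)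

-- ===== LEMMAS AND PROOFS =====

-- proof-side view of A: the rule table in chain order, the chain as first-match recursion
def pvRules : List (String × List String) :=
  [ ("순환기내과", ["hypertension", "hypertensive", "right heart failure", "angina", "atherosclerotic"]),
    ("내분비내과", ["diabetes", "non-insulin", "non0insulin"]),
    ("호흡기내과", ["lung cancer", "bronchopneumonia", "pneumonia", "covid"]),
    ("소화기내과", ["hepatocellular", "cholangiocarcinoma", "gallstone", "cardia of stomach"]),
    ("신장내과", ["chronic kidney", "tubular necrosis"]),
    ("안과", ["cataract", "glaucoma", "retinopathy"]),
    ("신경외과", ["disc", "stenosis", "myelopathy", "spinal"]),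
    ("신경과", ["cerebral infarction", "concussion", "hemiplegia", "paraplegia", "occlusion", "dissection", "dizziness"]),
    ("치과", ["caries", "pulpitis", "teeth", "tooth"]),
    ("비뇨의학과", ["prostate", "bph", "benign prostate"]),
    ("정형외과", ["arthritis", "periarthritis", "femur neck fracture", "thr", "osteoarthritis"]),
    ("정신건강의학과", ["paranoid schizophrenia"]),
    ("피부과", ["dermatitis"]),
    ("외과", ["hernia"]),
    ("응급의학과", ["emergency use of u07", "work accident", "acute pain"]),
    ("방사선종양학과", ["therapeutic radiology", "radiation"]) ]

def pvFirstD (q : String → Bool) : List (String × List String) → String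
  | [] => "기타 또는 미지정"
  | (d, kws) :: rest => if kws.any q then d else pvFirstD q rest

-- the flat scored keyword list generated from a rule table
def pvFlat : List (String × List String) → List (Nat × String)
  | [] => []
  | (_, kws) :: rest => kws.map (fun k => ((0 : Nat), k)) ++ (pvFlat rest).map (fun p => (p.1 + 1, p.2))

lemma pvFoldlMinZero : ∀ l : List Nat, l.foldl min 0 = 0 := by
  intro l; induction l with
  | nil => rfl
  | cons a t ih => simpa [Nat.zero_min] using ih

lemma pvFoldlMinSucc : ∀ (l : List Nat) (x : Nat), (l.map (· + 1)).foldl min (x + 1) = l.foldl min x + 1 := by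
  intro l; induction l with
  | nil => intro x; rfl
  | cons a t ih =>
    intro x
    have h : min (x + 1) (a + 1) = min x a + 1 := by omega
    simp only [List.map_cons, List.foldl_cons, h, ih]

lemma pvMinMapSucc (l : List Nat) : (l.map (· + 1)).min? = l.min?.map (· + 1) := by
  cases l with
  | nil => rfl
  | cons a t => simp [List.min?, pvFoldlMinSucc]

lemma pvFirstD_eq_min (q : String → Bool) (rules : List (String × List String)) :
    pvFirstD q rules =
      (match (((pvFlat rules).filter (fun p => q p.2)).map Prod.fst).min? with
       | none => "기타 또는 미지정"
       | some m => (rules.map Prod.fst).getD m "기타 또는 미지정") := by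
  induction rules with
  | nil => rfl
  | cons r rest ih =>
    obtain ⟨d, kws⟩ := r
    have hfl : (((pvFlat ((d, kws) :: rest)).filter (fun p => q p.2)).map Prod.fst)
        = (kws.filter q).map (fun _ => (0 : Nat))
          ++ (((pvFlat rest).filter (fun p => q p.2)).map Prod.fst).map (· + 1) := by
      simp [pvFlat, List.filter_append, List.filter_map, List.map_map, Function.comp_def]
    by_cases h : kws.any q
    · obtain ⟨k, ks, hk⟩ : ∃ k ks, kws.filter q = k :: ks := by
        rcases hf : kws.filter q with _ | ⟨k, ks⟩
        · exfalso
          rcases List.any_eq_true.mp h with ⟨x, hx, hq⟩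
          have : x ∈ kws.filter q := List.mem_filter.mpr ⟨hx, hq⟩
          simp [hf] at this
        · exact ⟨k, ks, rfl⟩
      have hmin : (((pvFlat ((d, kws) :: rest)).filter (fun p => q p.2)).map Prod.fst).min? = some 0 := by
        rw [hfl, hk]
        simp [List.min?, pvFoldlMinZero]
      rw [hmin]
      simp [pvFirstD, h]
    · have hf : kws.filter q = [] := by
        rw [List.filter_eq_nil_iff]
        intro x hx
        exact fun hq => h (List.any_eq_true.mpr ⟨x, hx, hq⟩)
      rw [hfl, hf]
      simp only [List.map_nil, List.nil_append, pvMinMapSucc]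
      rw [pvFirstD, if_neg h, ih]
      rcases h2 : (((pvFlat rest).filter (fun p => q p.2)).map Prod.fst).min? with _ | m
      · simp [h2]
      · simp [h2, List.getD]

lemma pvKeys_eq_flat : pvKeys = pvFlat pvRules := by rfl
lemma pvDepts_eq : pvDepts = pvRules.map Prod.fst := by rfl

lemma pvChain_eq_firstD (name : String) :
    map_seoul_disease_to_department name
      = pvFirstD (fun x => PySem.Str.isIn x (PySem.Str.lower (PySem.Str.strip name))) pvRules := by
  rfl

-- ===== VERDICT (by name: the statement is the Claim_ definition above) =====
theorem map_seoul_disease_to_department_spec : Claim_equal_map_seoul_disease_to_department := by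
  intro disease_name _
  unfold Spec_map_seoul_disease_to_department
  rw [pvChain_eq_firstD,
      pvFirstD_eq_min (fun x => PySem.Str.isIn x (PySem.Str.lower (PySem.Str.strip disease_name))) pvRules]
  unfold map_seoul_disease_to_department_alt
  rw [pvKeys_eq_flat, pvDepts_eq]
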